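-- pv_equiv track=rewrite | github.com/Zax337/advent-of-code-2025 | day3/main.py | act_part2
-- ===== SOURCE A (Python) =====
-- def act_part2(line):
--     bank = line.rstrip('\n')
--     result = []
--     while len(result) < 12 and len(bank) > 11 - len(result):
--         search = bank[:-(11-len(result))] if len(result) < 11 else bank
--         candidate = max(search)
--         result.append(candidate)
--         index = bank.index(candidate)
--         bank = bank[index + 1:]
--
--     if len(result) < 12:
--         result.extend(bank[:-(12-len(result))])
--     return ''.join(result)
-- ===== SOURCE B (Python) =====
-- def act_part2(line):
--     bank = line.rstrip('\n')
--     if len(bank) < 12: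
--         return ''
--     n = len(bank)
--     stack = []
--     for i, c in enumerate(bank):
--         while stack and stack[-1] < c and len(stack) - 1 + (n - i) >= 12:
--             stack.pop()
--         stack.append(c)
--     return ''.join(stack[:12])
-- ===== Notes on version B (the rewrite author's own statement) =====
-- stated objective: alternative
-- what changed: Replaced A's 12-round loop of slice/max/index rescans over the shrinking string with a single left-to-right monotonic-stack pass (pop while the top is smaller and enough characters remain to still reach length 12), then take the first 12 stack entries.
import Mathlib
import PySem

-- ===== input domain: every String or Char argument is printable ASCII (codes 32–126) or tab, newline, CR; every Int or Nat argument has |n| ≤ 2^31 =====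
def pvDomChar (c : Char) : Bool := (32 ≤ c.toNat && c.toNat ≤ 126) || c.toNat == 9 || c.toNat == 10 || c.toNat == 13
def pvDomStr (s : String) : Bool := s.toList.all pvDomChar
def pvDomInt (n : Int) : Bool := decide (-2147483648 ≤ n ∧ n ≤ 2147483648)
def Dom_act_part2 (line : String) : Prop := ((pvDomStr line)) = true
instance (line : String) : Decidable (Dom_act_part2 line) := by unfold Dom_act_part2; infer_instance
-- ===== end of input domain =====

-- B replaces A's 12-fold rescan-and-slice greedy with a single-pass monotonic stack (alternative algorithm, same result).

-- ===== PORT A =====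
-- line.rstrip('\n'): drop trailing newline characters (exact: rstrip with an explicit char set).
def pvRstripNl (cs : List Char) : List Char :=
  (cs.reverse.dropWhile (fun c => c == '\n')).reverse

-- the while loop of A: state (result, bank); returns the final state.
-- 'max(search)' is PySem.List.max? with identity key, 'bank.index(c)' is PySem.List.index?;
-- their 'none' branches are Python's ValueError and are unreachable (search is nonempty, candidate ∈ bank).
def pvLoopA (result bank : List Char) : List Char × List Char :=
  if result.length < 12 ∧ bank.length > 11 - result.length then
    -- search = bank[:-(11-len(result))] if len(result) < 11 else bank, inlined into its single use
    match PySem.List.max? (if result.length < 11 then bank.take (bank.length - (11 - result.length)) else bank) (fun x => x) with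
    | none => (result, bank)      -- unreachable (max('') would raise)
    | some candidate =>
      match h : PySem.List.index? bank candidate with
      | none => (result, bank)    -- unreachable (candidate ∈ bank)
      | some index => pvLoopA (result ++ [candidate]) (bank.drop (index + 1))
  else (result, bank)
termination_by bank.length
decreasing_by
  rename_i hcond
  simp_all [List.length_drop]
  omega

def act_part2 (line : String) : String :=
  let bank := pvRstripNl line.toList
  let st := pvLoopA [] bank
  let result := st.1
  let bank' := st.2
  if result.length < 12 then
    String.ofList (result ++ bank'.take (bank'.length - (12 - result.length)))
  else
    String.ofList result

-- ===== PORT B =====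
-- the inner 'while stack and stack[-1] < c and len(stack)-1+(n-i) >= 12: stack.pop()'
-- (stack kept top-first; rem = n - i, the number of characters from the current one to the end).
def pvPopB (stack : List Char) (c : Char) (rem : Nat) : List Char :=
  match stack with
  | [] => []
  | t :: rest =>
    if t < c ∧ (t :: rest).length - 1 + rem ≥ 12 then pvPopB rest c rem
    else t :: rest

-- the 'for i, c in enumerate(bank)' loop
def pvRunB (stack : List Char) (bank : List Char) : List Char :=
  match bank with
  | [] => stack
  | c :: rest => pvRunB (c :: pvPopB stack c (rest.length + 1)) rest

def act_part2_alt (line : String) : String :=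
  let bank := pvRstripNl line.toList
  if bank.length < 12 then ""
  else String.ofList (((pvRunB [] bank).reverse).take 12)

-- ===== PRECONDITION & SPEC =====
def Spec_act_part2 (line : String) (out : String) : Prop := out = act_part2_alt line
instance (line : String) (out : String) : Decidable (Spec_act_part2 line out) := by unfold Spec_act_part2; infer_instance

-- ===== CLAIM (what is proved, stated in full; the proofs are below) =====
def Claim_equal_act_part2 : Prop := ∀ (line : String), Dom_act_part2 line → Spec_act_part2 line (act_part2 line)

-- ===== LEMMAS AND PROOFS =====

-- The common greedy specification: pick, 12 times, the largest character that still
-- leaves enough characters behind it, advancing past its first occurrence.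
def pvGreedy : Nat → List Char → List Char
  | 0, _ => []
  | k + 1, s =>
    match PySem.List.max? (s.take (s.length - k)) (fun x => x) with
    | none => []
    | some c =>
      match PySem.List.index? s c with
      | none => []
      | some i => c :: pvGreedy k (s.drop (i + 1))

-- the B-side stack cannot pop into g while any character beating g[j] is still "too late"
def pvSafe (g s : List Char) : Prop :=
  ∀ j, (hj : j < g.length) → ∀ i, (hi : i < s.length) →
    g[j] < s[i] → (g.length - j - 1) + (s.length - i) < 12

theorem pvSafe_tail {g : List Char} {c : Char} {s : List Char}
    (h : pvSafe g (c :: s)) : pvSafe g s := by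
  intro j hj i hi hlt
  have := h j hj (i + 1) (by simp; omega) (by simpa using hlt)
  simp at this
  omega

-- facts about one greedy pick: c is the max of the window s.take n, i its first index in s
theorem pvPickFacts (s : List Char) (n : Nat) (c : Char) (i : Nat)
    (hm : PySem.List.max? (s.take n) (fun x => x) = some c)
    (hi : PySem.List.index? s c = some i) :
    i < n ∧ i < s.length ∧
    (∀ j, (hj : j < s.length) → j < i → s[j] < c) ∧
    (∀ j, (hj : j < s.length) → j < n → s[j] ≤ c) := by
  have hcmem : c ∈ s.take n := PySem.List.max?_mem hm
  have hmax : ∀ y ∈ s.take n, y ≤ c := by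
    intro y hy; exact PySem.List.max?_isMax hm y hy
  obtain ⟨hilen, hic, hfirst⟩ := PySem.List.getElem_of_index?_eq_some hi
  obtain ⟨m, hm1, hm2⟩ := List.mem_iff_getElem.mp hcmem
  have hmlen : m < n := by
    have := hm1; simp [List.length_take] at this; omega
  have hmslen : m < s.length := by
    have := hm1; simp [List.length_take] at this; omega
  have hsm : s[m] = c := by
    rw [← hm2]; simp [List.getElem_take]
  have hin : i ≤ m := by
    by_contra hcon
    exact hfirst m (by omega) hsm
  have hwin : ∀ j, (hj : j < s.length) → j < n → s[j] ≤ c := by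
    intro j hj hjn
    have : s[j] ∈ s.take n := by
      have : (s.take n)[j]'(by simp [List.length_take]; omega) = s[j] := by
        simp [List.getElem_take]
      rw [← this]; exact List.getElem_mem _
    exact hmax _ this
  refine ⟨by omega, by omega, ?_, hwin⟩
  intro j hj hji
  have hle : s[j] ≤ c := hwin j hj (by omega)
  have hne : s[j] ≠ c := hfirst j hji
  exact lt_of_le_of_ne hle hne

-- the A loop computes the greedy picks
theorem pvGreedy_len (k : Nat) : ∀ (s : List Char), k ≤ s.length → (pvGreedy k s).length = k := by
  induction k with
  | zero => intro s _; simp [pvGreedy]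
  | succ k ih =>
    intro s hk
    rw [pvGreedy]
    have hwne : s.take (s.length - k) ≠ [] := by
      intro h
      have := congrArg List.length h
      simp [List.length_take] at this
      omega
    cases hm : PySem.List.max? (s.take (s.length - k)) (fun x => x) with
    | none => exact absurd ((PySem.List.max?_eq_none_iff _ _).mp hm) hwne
    | some c =>
      have hcs : c ∈ s := List.mem_of_mem_take (PySem.List.max?_mem hm)
      cases hidx : PySem.List.index? s c with
      | none =>
        rw [PySem.List.index?_eq_none_iff] at hidx
        exact absurd hcs hidx
      | some i =>
        obtain ⟨hin, hilen, _, _⟩ := pvPickFacts s (s.length - k) c i hm hidx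
        simp only [hidx, List.length_cons]
        rw [ih (s.drop (i+1)) (by simp; omega)]

theorem pvLoopA_eq (k : Nat) : ∀ (result bank : List Char),
    result.length + k = 12 → k ≤ bank.length →
    (pvLoopA result bank).1 = result ++ pvGreedy k bank := by
  induction k with
  | zero =>
    intro result bank hlen _
    rw [pvLoopA]
    rw [if_neg (by rintro ⟨h1, _⟩; omega)]
    simp [pvGreedy]
  | succ k ih =>
    intro result bank hlen hk
    have hr : result.length = 11 - k ∧ k ≤ 11 := by omega
    rw [pvLoopA]
    have hcond : result.length < 12 ∧ bank.length > 11 - result.length := by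
      constructor
      · omega
      · omega
    rw [if_pos hcond]
    have hsearch : (if result.length < 11 then bank.take (bank.length - (11 - result.length)) else bank)
        = bank.take (bank.length - k) := by
      by_cases h11 : result.length < 11
      · rw [if_pos h11]; congr 1; omega
      · rw [if_neg h11]
        have : k = 0 := by omega
        subst this
        simp
    rw [hsearch]
    rw [pvGreedy]
    have hwne : bank.take (bank.length - k) ≠ [] := by
      intro h
      have := congrArg List.length h
      simp [List.length_take] at this
      omega
    cases hm : PySem.List.max? (bank.take (bank.length - k)) (fun x => x) with
    | none => exact absurd ((PySem.List.max?_eq_none_iff _ _).mp hm) hwne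
    | some c =>
      have hcs : c ∈ bank := List.mem_of_mem_take (PySem.List.max?_mem hm)
      cases hidx : PySem.List.index? bank c with
      | none =>
        rw [PySem.List.index?_eq_none_iff] at hidx
        exact absurd hcs hidx
      | some i =>
        obtain ⟨hin, hilen, _, _⟩ := pvPickFacts bank (bank.length - k) c i hm hidx
        have hrec := ih (result ++ [c]) (bank.drop (i+1)) (by simp; omega) (by simp; omega)
        split
        · rename_i heq; simp at heq
        · rename_i cand heq
          injection heq with hc
          subst hc
          split
          · rename_i heq2; rw [hidx] at heq2; simp at heq2
          · rename_i idx heq2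
            rw [hidx] at heq2
            injection heq2 with h2
            subst h2
            rw [hrec]
            have hidx2 : List.idxOf? c bank = some i := by simpa using hidx
            simp [hidx2]

-- ===== B side =====

theorem pvPopB_suffix (d : List Char) (g : List Char) (x : Char) (rem : Nat)
    (hprot : ∀ t rest', g = t :: rest' → t < x → g.length - 1 + rem < 12) :
    ∃ d', pvPopB (d ++ g) x rem = d' ++ g ∧ ∀ y ∈ d', y ∈ d := by
  induction d with
  | nil =>
    refine ⟨[], ?_, by simp⟩
    match g with
    | [] => simp [pvPopB]
    | t :: g' =>
      simp only [List.nil_append, pvPopB]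
      rw [if_neg]
      rintro ⟨hlt, hbud⟩
      have := hprot t g' rfl hlt
      simp at this hbud
      omega
  | cons y d₂ ih =>
    simp only [List.cons_append, pvPopB]
    by_cases hc : y < x ∧ (y :: (d₂ ++ g)).length - 1 + rem ≥ 12
    · rw [if_pos hc]
      obtain ⟨d', h1, h2⟩ := ih
      exact ⟨d', h1, fun z hz => List.mem_cons_of_mem _ (h2 z hz)⟩
    · rw [if_neg hc]
      exact ⟨y :: d₂, by simp, by simp⟩

theorem pvPopB_all (d : List Char) (g : List Char) (c : Char) (rem : Nat)
    (hd : ∀ y ∈ d, y < c)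
    (hbud : 12 ≤ g.length + rem)
    (hprot : ∀ t rest', g = t :: rest' → t < c → g.length - 1 + rem < 12) :
    pvPopB (d ++ g) c rem = g := by
  induction d with
  | nil =>
    match g with
    | [] => simp [pvPopB]
    | t :: g' =>
      simp only [List.nil_append, pvPopB]
      rw [if_neg]
      rintro ⟨hlt, hb⟩
      have := hprot t g' rfl hlt
      simp at this hb
      omega
  | cons y d₂ ih =>
    simp only [List.cons_append, pvPopB]
    rw [if_pos]
    · exact ih (fun z hz => hd z (List.mem_cons_of_mem _ hz))
    · refine ⟨hd y (by simp), ?_⟩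
      simp
      omega

theorem pvPushRun (p : List Char) : ∀ (d g : List Char) (c : Char) (rest : List Char),
    (∀ y ∈ d, y < c) → (∀ y ∈ p, y < c) →
    12 ≤ g.length + rest.length + 1 →
    pvSafe g (p ++ c :: rest) →
    pvRunB (d ++ g) (p ++ c :: rest) = pvRunB (c :: g) rest := by
  induction p with
  | nil =>
    intro d g c rest hd _ hbud hsafe
    simp only [List.nil_append, pvRunB]
    congr 1
    rw [pvPopB_all d g c (rest.length + 1) hd (by omega)]
    intro t rest' hg hlt
    have := hsafe 0 (by simp [hg]) 0 (by simp) (by simp [hg]; exact hlt)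
    simp [hg] at this ⊢
    omega
  | cons x p' ih =>
    intro d g c rest hd hp hbud hsafe
    simp only [List.cons_append, pvRunB]
    have hprot : ∀ t rest', g = t :: rest' → t < x → g.length - 1 + ((p' ++ c :: rest).length + 1) < 12 := by
      intro t rest' hg hlt
      have := hsafe 0 (by simp [hg]) 0 (by simp) (by simp [hg]; exact hlt)
      simp [hg] at this ⊢
      omega
    obtain ⟨d', hpop, hmem⟩ := pvPopB_suffix d g x ((p' ++ c :: rest).length + 1) hprot
    · rw [hpop]
      have : x :: (d' ++ g) = (x :: d') ++ g := by simp
      rw [this]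
      apply ih (x :: d') g c rest
      · intro z hz
        rcases List.mem_cons.mp hz with h | h
        · subst h; exact hp _ (List.mem_cons_self ..)
        · exact hd z (hmem z h)
      · intro y hy; exact hp y (List.mem_cons_of_mem _ hy)
      · exact hbud
      · exact pvSafe_tail hsafe

theorem pvRunB_base (s : List Char) : ∀ (e g : List Char),
    g.length = 12 → pvSafe g s →
    ((pvRunB (e ++ g) s).reverse).take 12 = g.reverse := by
  induction s with
  | nil =>
    intro e g hg _
    simp only [pvRunB, List.reverse_append]
    rw [List.take_left' (by simp [hg])]
  | cons c rest ih =>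
    intro e g hg hsafe
    simp only [pvRunB]
    have hprot : ∀ t rest', g = t :: rest' → t < c → g.length - 1 + (rest.length + 1) < 12 := by
      intro t rest' hgeq hlt
      have := hsafe 0 (by simp [hgeq]) 0 (by simp) (by simp [hgeq]; exact hlt)
      simp [hgeq] at this ⊢
      omega
    obtain ⟨d', hpop, _⟩ := pvPopB_suffix e g c (rest.length + 1) hprot
    rw [hpop]
    have : c :: (d' ++ g) = (c :: d') ++ g := by simp
    rw [this]
    exact ih (c :: d') g hg (pvSafe_tail hsafe)

theorem pvMain (k : Nat) : ∀ (s g : List Char),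
    g.length + k = 12 → k ≤ s.length → pvSafe g s →
    ((pvRunB g s).reverse).take 12 = g.reverse ++ pvGreedy k s := by
  induction k with
  | zero =>
    intro s g hg _ hsafe
    have := pvRunB_base s [] g (by omega) hsafe
    simpa [pvGreedy] using this
  | succ k ih =>
    intro s g hg hk hsafe
    rw [pvGreedy]
    have hwne : s.take (s.length - k) ≠ [] := by
      intro h
      have := congrArg List.length h
      simp [List.length_take] at this
      omega
    cases hm : PySem.List.max? (s.take (s.length - k)) (fun x => x) with
    | none => exact absurd ((PySem.List.max?_eq_none_iff _ _).mp hm) hwne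
    | some c =>
      have hcs : c ∈ s := List.mem_of_mem_take (PySem.List.max?_mem hm)
      cases hidx : PySem.List.index? s c with
      | none =>
        rw [PySem.List.index?_eq_none_iff] at hidx
        exact absurd hcs hidx
      | some i =>
        obtain ⟨hin, hilen, hlt, hwin⟩ := pvPickFacts s (s.length - k) c i hm hidx
        obtain ⟨_, hic, _⟩ := PySem.List.getElem_of_index?_eq_some hidx
        -- decompose s = take i ++ c :: drop (i+1)
        have hdec : s = s.take i ++ c :: s.drop (i + 1) := by
          conv_lhs => rw [← List.take_append_drop i s]
          congr 1
          rw [List.drop_eq_getElem_cons hilen, hic]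
        have hlens : (s.take i).length = i := by simp; omega
        have hdroplen : (s.drop (i+1)).length = s.length - i - 1 := by simp; omega
        -- run past the prefix and the pick
        have hrun : pvRunB g s = pvRunB (c :: g) (s.drop (i + 1)) := by
          conv_lhs => rw [hdec]
          have : pvRunB g (s.take i ++ c :: s.drop (i+1))
              = pvRunB ([] ++ g) (s.take i ++ c :: s.drop (i+1)) := by simp
          rw [this]
          apply pvPushRun (s.take i) [] g c (s.drop (i+1))
          · simp
          · intro y hy
            obtain ⟨m, hm1, hm2⟩ := List.mem_iff_getElem.mp hy
            have hmi : m < i := by simp [List.length_take] at hm1; omega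
            have : (s.take i)[m]'hm1 = s[m]'(by omega) := by simp [List.getElem_take]
            rw [← hm2, this]
            exact hlt m (by omega) hmi
          · simp
            omega
          · rw [← hdec]; exact hsafe
        rw [hrun]
        -- safety for the new stack
        have hsafe' : pvSafe (c :: g) (s.drop (i + 1)) := by
          intro j hj m hmlt hglt
          have hmget : (s.drop (i+1))[m] = s[i + 1 + m]'(by simp at hmlt; omega) := by
            simp [List.getElem_drop]
          match j with
          | 0 =>
            simp only [List.getElem_cons_zero] at hglt
            rw [hmget] at hglt
            -- s[i+1+m] > c, so i+1+m is outside the window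
            have hout : ¬ (i + 1 + m < s.length - k) := by
              intro hcon
              have := hwin (i+1+m) (by simp at hmlt; omega) hcon
              exact absurd hglt (not_lt.mpr this)
            simp at hmlt ⊢
            omega
          | j' + 1 =>
            simp only [List.getElem_cons_succ] at hglt
            rw [hmget] at hglt
            have := hsafe j' (by simp at hj; omega) (i + 1 + m) (by simp at hmlt; omega) hglt
            simp at hmlt hj this ⊢
            omega
        have := ih (s.drop (i+1)) (c :: g) (by simp; omega) (by simp; omega) hsafe'
        rw [this]
        simp only [hidx]
        simp

-- ===== assembly =====

theorem act_part2_eq_alt (line : String) : act_part2 line = act_part2_alt line := by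
  unfold act_part2 act_part2_alt
  set bank := pvRstripNl line.toList with hbank
  by_cases hlen : bank.length < 12
  · -- short input: A's loop never runs and the tail-extend is empty; B returns ""
    rw [if_pos hlen]
    have hloop : pvLoopA [] bank = ([], bank) := by
      rw [pvLoopA]
      rw [if_neg]
      rintro ⟨_, h2⟩
      simp at h2
      omega
    simp only [hloop]
    simp
    omega
  · rw [if_neg hlen]
    have h12 : 12 ≤ bank.length := by omega
    have hA := pvLoopA_eq 12 [] bank (by simp) h12
    have hAlen : (pvLoopA [] bank).1.length = 12 := by
      rw [hA]; simp [pvGreedy_len 12 bank h12]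
    have hB := pvMain 12 bank [] (by simp) h12 (by intro j hj; simp at hj)
    simp only [hA, List.nil_append] at *
    rw [if_neg (by omega)]
    rw [hB]
    simp

-- ===== VERDICT (by name: the statement is the Claim_ definition above) =====
theorem act_part2_spec : Claim_equal_act_part2 := by
  intro line _
  unfold Spec_act_part2
  exact act_part2_eq_alt line
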